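-- pv_equiv track=rewrite | github.com/Guiyom974/Autoresearch-BatchMode | experiments/breakthrough/Computational Number Theory - Adaptive LDAB Calibration - 20260326_231024/run_031/05_experiment_code.py | primorial_gaps
-- ===== SOURCE A (Python) =====
-- from math import isqrt, log
--
-- def sieve_primes(n):
--     """Return list of primes <= n using optimized sieve."""
--     if n < 2:
--         return []
--     size = n + 1
--     sieve = bytearray(b"\x01") * size
--     sieve[0:2] = b"\x00\x00"
--     for p in range(2, isqrt(n) + 1):
--         if sieve[p]:
--             sieve[p*p:n+1:p] = b"\x00" * ((n - p*p)//p + 1)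
--     return [i for i, is_prime in enumerate(sieve) if is_prime]
--
-- def primorial_gaps(M):
--     """
--     Generate all gaps in the reduced residue system modulo M.
--     Gaps = differences between consecutive integers coprime to M (mod M).
--     Returns list of gap sizes (integers >= 1), length = phi(M)
--     """
--     # Use segmented approach for large M: iterate over [1, M] checking gcd
--     # But for k<=8, M <= 9699690 (2*3*5*7*11*13*17*19), manageable directly
--     from math import gcd
--     phi = M
--     primes = sieve_primes(int(M**0.5)+1)
--     # Actually compute phi via inclusion-exclusion for safety
--     # but for primorial M, phi(M) = ∏ (p-1) for p|M
--     # We'll compute phi directly from M's prime factors (already known via sieve)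
--     # For safety, recompute phi:
--     phi = 1
--     temp = M
--     for p in range(2, int(M**0.5)+1):
--         if temp % p == 0:
--             phi *= (p - 1)
--             temp //= p
--             while temp % p == 0:
--                 temp //= p
--     if temp > 1:
--         phi *= (temp - 1)
--
--     gaps = []
--     prev = None
--     # Collect coprime numbers in [1, M]
--     coprimes = []
--     for x in range(1, M+1):
--         if gcd(x, M) == 1:
--             coprimes.append(x)
--
--     # Compute gaps (including wrap-around from last to first + M)
--     for i, c in enumerate(coprimes):
--         if i == 0:
--             prev = c
--         else:
--             gaps.append(c - prev)
--             prev = c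
--     # wrap-around gap: (first + M) - last
--     gaps.append(coprimes[0] + M - coprimes[-1])
--     return gaps
-- ===== SOURCE B (Python) =====
-- from math import isqrt
--
-- def primorial_gaps(M):
--     """
--     Gaps between consecutive integers coprime to M in [1, M], plus the
--     wrap-around gap.  Instead of an O(M log M) gcd test per element, factor
--     out a small set of divisors of M by sqrt trial division and sieve-mark
--     their multiples with slice assignments, then scan once.
--     """
--     # divisors of M (each >= 2), enough to cover every common factor:
--     # every d | M with 2 <= d <= isqrt(M), its cofactor M // d, and M itself.
--     fs = []
--     for d in range(2, isqrt(M) + 1):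
--         if M % d == 0:
--             fs.append(d)
--             fs.append(M // d)
--     if M > 1:
--         fs.append(M)
--     marked = bytearray(M + 1)
--     for f in fs:
--         marked[f::f] = b"\x01" * (M // f)
--     cs = [x for x in range(1, M + 1) if not marked[x]]
--     return [b - a for a, b in zip(cs, cs[1:])] + [cs[0] + M - cs[-1]]
-- ===== Notes on version B (the rewrite author's own statement) =====
-- stated objective: faster
-- what changed: B replaces A's per-element gcd(x, M) test over [1, M] by a divisor sieve: it finds divisors of M by sqrt trial division, marks their multiples in a bytearray with slice assignments, and reads off the coprimes and gaps in one scan (zip instead of the enumerate/prev loop); A's dead phi/prime-sieve computations are dropped.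
import Mathlib
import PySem

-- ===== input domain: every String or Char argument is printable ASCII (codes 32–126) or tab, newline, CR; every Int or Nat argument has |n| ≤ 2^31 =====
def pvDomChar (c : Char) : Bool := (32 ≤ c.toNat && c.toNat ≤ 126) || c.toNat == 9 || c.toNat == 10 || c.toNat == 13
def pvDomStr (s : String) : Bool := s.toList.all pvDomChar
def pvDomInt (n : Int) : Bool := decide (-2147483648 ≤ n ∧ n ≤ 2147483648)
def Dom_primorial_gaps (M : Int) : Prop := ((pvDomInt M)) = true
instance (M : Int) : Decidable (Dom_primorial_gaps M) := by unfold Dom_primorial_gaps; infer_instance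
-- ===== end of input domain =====

-- B replaces A's per-element gcd test by a divisor sieve (sqrt trial division, mark
-- multiples, one scan); measured faster on large M in a timing run.

-- ===== PORT A =====
-- A's `primes = sieve_primes(...)` and the `phi` recomputation are dead code (their
-- results never affect the returned value) and go through float M**0.5; omitted.
def primorial_gaps (M : Int) : List Int :=
  let coprimes : List Int :=
    (PySem.List.pyRange 1 (M + 1) 1).foldl
      (fun acc x => if Int.gcd x M = 1 then acc ++ [x] else acc) []
  let st :=
    (PySem.List.enumerate coprimes 0).foldl
      (fun (st : List Int × Option Int) ic =>
        if ic.1 = 0 then (st.1, some ic.2)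
        else (st.1 ++ [ic.2 - st.2.getD 0], some ic.2))
      ([], none)
  -- coprimes[0] / coprimes[-1]: nonempty under Pre_ (1 is coprime to M); default 0 unused
  st.1 ++ [PySem.List.pyGetD coprimes 0 0 + M - PySem.List.pyGetD coprimes (-1) 0]

-- ===== PORT B =====
def primorial_gaps_alt (M : Int) : List Int :=
  let fs : List Int :=
    (PySem.List.pyRange 2 (((Int.toNat M).sqrt : Int) + 1) 1).foldl
      (fun acc d => if PySem.Int.mod M d = 0 then acc ++ [d, PySem.Int.floordiv M d] else acc) []
  let fs : List Int := if M > 1 then fs ++ [M] else fs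
  -- bytearray(M+1) as a Nat-indexed characteristic function; the slice assignment
  -- marked[f::f] = "\x01"*(M//f) sets exactly the indices k*f for k = 1 .. M//f
  let marked : Nat → Bool :=
    fs.foldl (fun mk f =>
      (PySem.List.pyRange 1 (PySem.Int.floordiv M f + 1) 1).foldl
        (fun mk' k => fun i => if i = (k * f).toNat then true else mk' i) mk)
      (fun _ => false)
  let cs : List Int :=
    (PySem.List.pyRange 1 (M + 1) 1).filter (fun x => !marked x.toNat)
  -- cs[1:] is cs.tail; cs[0] / cs[-1] nonempty under Pre_; default 0 unused
  (cs.zip cs.tail).map (fun p => p.2 - p.1)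
    ++ [PySem.List.pyGetD cs 0 0 + M - PySem.List.pyGetD cs (-1) 0]

-- ===== PRECONDITION & SPEC =====
-- Pre_ excludes exactly the nonpositive inputs, on which the Python A raises
-- (IndexError on an empty coprime list, or TypeError from a complex square root).
def Pre_primorial_gaps (M : Int) : Prop := 1 ≤ M
instance (M : Int) : Decidable (Pre_primorial_gaps M) := by unfold Pre_primorial_gaps; infer_instance
def pvWitness_primorial_gaps : Int := (6)

def Spec_primorial_gaps (M : Int) (out : List Int) : Prop := out = primorial_gaps_alt M
instance (M : Int) (out : List Int) : Decidable (Spec_primorial_gaps M out) := by unfold Spec_primorial_gaps; infer_instance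

-- ===== CLAIM (what is proved, stated in full; the proofs are below) =====
def Claim_equal_primorial_gaps : Prop := ∀ (M : Int), Dom_primorial_gaps M → Pre_primorial_gaps M → Spec_primorial_gaps M (primorial_gaps M)

-- ===== LEMMAS AND PROOFS =====

theorem pv_foldl_update (L : List Int) (t : Nat → Bool) (g : Int → Nat) (x : Nat) :
    (L.foldl (fun mk' k => fun i => if i = g k then true else mk' i) t) x
      = (t x || L.any (fun k => x = g k)) := by
  induction L generalizing t with
  | nil => simp
  | cons k L ih =>
      simp only [List.foldl_cons, List.any_cons, ih]
      by_cases h : x = g k <;> simp [h]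

theorem pv_outer (L : List Int) (P : Int → List Int) (g : Int → Int → Nat) (t : Nat → Bool) (x : Nat) :
    (L.foldl (fun mk f => (P f).foldl (fun mk' k => fun i => if i = g f k then true else mk' i) mk) t) x
      = (t x || L.any (fun f => (P f).any (fun k => x = g f k))) := by
  induction L generalizing t with
  | nil => simp
  | cons f L ih =>
      simp only [List.foldl_cons, List.any_cons, ih, pv_foldl_update]
      rw [Bool.or_assoc]

-- inner any ↔ divisibility
theorem pv_inner_iff (M f x : Int) (hf : 1 ≤ f) (hx : 1 ≤ x) (hxM : x ≤ M) :
    ((PySem.List.pyRange 1 (PySem.Int.floordiv M f + 1) 1).any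
        (fun k => x.toNat = (k * f).toNat)) = true ↔ f ∣ x := by
  rw [PySem.Int.floordiv_eq_ediv_of_pos (by omega)]
  simp only [List.any_eq_true, PySem.List.mem_pyRange_one, decide_eq_true_eq]
  constructor
  · rintro ⟨k, ⟨hk1, hk2⟩, hkx⟩
    have hx' : x = k * f := by
      have : 0 ≤ k * f := by positivity
      omega
    exact ⟨k, by rw [hx', mul_comm]⟩
  · intro hdvd
    refine ⟨x / f, ⟨?_, ?_⟩, ?_⟩
    · have hfx : f ≤ x := Int.le_of_dvd (by omega) hdvd
      exact (Int.le_ediv_iff_mul_le (by omega : (0:Int) < f)).mpr (by omega)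
    · have := Int.ediv_le_ediv (by omega : (0:Int) < f) hxM
      omega
    · rw [Int.ediv_mul_cancel hdvd]

-- membership in the trial-division fold
theorem pv_mem_fs0 (M s y : Int) :
    y ∈ (PySem.List.pyRange 2 (s + 1) 1).foldl
        (fun acc d => if PySem.Int.mod M d = 0 then acc ++ [d, PySem.Int.floordiv M d] else acc) []
      ↔ ∃ d, 2 ≤ d ∧ d ≤ s ∧ M % d = 0 ∧ (y = d ∨ y = M / d) := by
  rw [PySem.List.foldl_congr_mem
        (l := PySem.List.pyRange 2 (s + 1) 1) (init := ([] : List Int))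
        (f := fun acc d => if PySem.Int.mod M d = 0 then acc ++ [d, PySem.Int.floordiv M d] else acc)
        (g := fun acc d => acc ++ (if PySem.Int.mod M d = 0 then [d, PySem.Int.floordiv M d] else []))
        (by intro acc d _; dsimp only; split <;> simp)]
  rw [PySem.List.foldl_append_eq_flatMap]
  simp only [List.nil_append, List.mem_flatMap, PySem.List.mem_pyRange_one]
  constructor
  · rintro ⟨d, ⟨hd1, hd2⟩, hy⟩
    have hdpos : (0:Int) < d := by omega
    rw [PySem.Int.mod_eq_emod_of_pos hdpos, PySem.Int.floordiv_eq_ediv_of_pos hdpos] at hy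
    by_cases h : M % d = 0
    · simp [h] at hy
      exact ⟨d, by omega, by omega, h, hy⟩
    · simp [h] at hy
  · rintro ⟨d, hd1, hd2, hmod, hy⟩
    have hdpos : (0:Int) < d := by omega
    refine ⟨d, ⟨by omega, by omega⟩, ?_⟩
    rw [PySem.Int.mod_eq_emod_of_pos hdpos, PySem.Int.floordiv_eq_ediv_of_pos hdpos]
    simp [hmod]
    tauto

def pvFs (M : Int) : List Int :=
  let fs : List Int :=
    (PySem.List.pyRange 2 (((Int.toNat M).sqrt : Int) + 1) 1).foldl
      (fun acc d => if PySem.Int.mod M d = 0 then acc ++ [d, PySem.Int.floordiv M d] else acc) []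
  if M > 1 then fs ++ [M] else fs

theorem pv_mem_fs (M y : Int) :
    y ∈ pvFs M ↔
      (∃ d, 2 ≤ d ∧ d ≤ ((Int.toNat M).sqrt : Int) ∧ d ∣ M ∧ (y = d ∨ y = M / d))
        ∨ (1 < M ∧ y = M) := by
  unfold pvFs
  by_cases h : M > 1 <;> simp [pv_mem_fs0, h]

theorem pv_sqrt_sq_le (M : Int) (hM : 1 ≤ M) :
    (((Int.toNat M).sqrt : Int)) * (((Int.toNat M).sqrt : Int)) ≤ M := by
  have h3 : (Int.toNat M).sqrt * (Int.toNat M).sqrt ≤ Int.toNat M := by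
    rw [← pow_two]; exact Nat.sqrt_le' (Int.toNat M)
  have hMeq : ((Int.toNat M : Int)) = M := by omega
  rw [← hMeq]; exact_mod_cast h3

theorem pv_fs_facts (M y : Int) (hM : 1 ≤ M) (hy : y ∈ pvFs M) : 2 ≤ y ∧ y ∣ M := by
  have hs := pv_sqrt_sq_le M hM
  rcases (pv_mem_fs M y).mp hy with ⟨d, hd2, hds, hdvd, hyd⟩ | ⟨hM1, rfl⟩
  · have hdpos : (0:Int) < d := by omega
    rcases hyd with rfl | rfl
    · exact ⟨hd2, hdvd⟩
    · constructor
      · have hdd : d * d ≤ M := le_trans (by nlinarith) hs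
        have : d ≤ M / d := (Int.le_ediv_iff_mul_le hdpos).mpr hdd
        omega
      · exact Int.ediv_dvd_of_dvd hdvd
  · exact ⟨by omega, dvd_refl _⟩

theorem pv_lt_succ_sqrt (M : Int) (hM : 1 ≤ M) :
    M < (((Int.toNat M).sqrt : Int) + 1) * (((Int.toNat M).sqrt : Int) + 1) := by
  have h3 : Int.toNat M < ((Int.toNat M).sqrt + 1) * ((Int.toNat M).sqrt + 1) := by
    have := Nat.lt_succ_sqrt' (Int.toNat M)
    rw [pow_two] at this; exact this
  have hMeq : ((Int.toNat M : Int)) = M := by omega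
  rw [← hMeq]; exact_mod_cast h3

theorem pv_any_iff (M x : Int) (hM : 1 ≤ M) (hx1 : 1 ≤ x) (hxM : x ≤ M) :
    ((pvFs M).any (fun f =>
        (PySem.List.pyRange 1 (PySem.Int.floordiv M f + 1) 1).any
          (fun k => x.toNat = (k * f).toNat))) = true ↔ Int.gcd x M ≠ 1 := by
  rw [List.any_eq_true]
  constructor
  · rintro ⟨f, hf, hinner⟩ hg
    obtain ⟨hf2, hfM⟩ := pv_fs_facts M f hM hf
    have hfx : f ∣ x := (pv_inner_iff M f x (by omega) hx1 hxM).mp hinner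
    have hd : f ∣ (Int.gcd x M : Int) := Int.dvd_coe_gcd hfx hfM
    rw [hg] at hd
    have := Int.le_of_dvd (by norm_num) hd
    norm_num at this; omega
  · intro hg
    set g : Int := (Int.gcd x M : Int) with hgdef
    have hgx : g ∣ x := Int.gcd_dvd_left x M
    have hgM : g ∣ M := Int.gcd_dvd_right x M
    have hg0 : g ≠ 0 := by
      simp only [hgdef, ne_eq, Int.natCast_eq_zero, Int.gcd_eq_zero_iff]
      rintro ⟨rfl, -⟩; omega
    have hg1 : g ≠ 1 := by
      simp only [hgdef, ne_eq, Nat.cast_eq_one]; exact hg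
    have hg2 : 2 ≤ g := by
      have : 0 ≤ g := hgdef ▸ Int.natCast_nonneg _
      omega
    set s : Int := ((Int.toNat M).sqrt : Int) with hsdef
    by_cases hle : g ≤ s
    · exact ⟨g, (pv_mem_fs M g).mpr (Or.inl ⟨g, hg2, hle, hgM, Or.inl rfl⟩),
        (pv_inner_iff M g x (by omega) hx1 hxM).mpr hgx⟩
    · by_cases hEq : g = M
      · exact ⟨M, (pv_mem_fs M M).mpr (Or.inr ⟨by omega, rfl⟩),
          (pv_inner_iff M M x (by omega) hx1 hxM).mpr (hEq ▸ hgx)⟩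
      · have hgM' : g ≤ M := Int.le_of_dvd (by omega) hgM
        set e : Int := M / g with hedef
        have hMe : g * e = M := Int.mul_ediv_cancel' hgM
        have he0 : 0 < e := by nlinarith
        have he2 : 2 ≤ e := by
          rcases lt_or_ge e 2 with h | h
          · have : e = 1 := by omega
            rw [this, mul_one] at hMe; exact absurd hMe hEq
          · exact h
        have hlt := pv_lt_succ_sqrt M hM
        have hes : e ≤ s := by nlinarith
        have hMe' : M / e = g := by rw [← hMe, Int.mul_ediv_cancel _ he0.ne']
        refine ⟨g, (pv_mem_fs M g).mpr (Or.inl ⟨e, he2, hes, ⟨g, by rw [← hMe]; ring⟩, Or.inr hMe'.symm⟩),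
          (pv_inner_iff M g x (by omega) hx1 hxM).mpr hgx⟩

def pvMarked (M : Int) : Nat → Bool :=
  (pvFs M).foldl (fun mk f =>
      (PySem.List.pyRange 1 (PySem.Int.floordiv M f + 1) 1).foldl
        (fun mk' k => fun i => if i = (k * f).toNat then true else mk' i) mk)
    (fun _ => false)

theorem pv_coprimes_eq (M : Int) (hM : 1 ≤ M) :
    (PySem.List.pyRange 1 (M + 1) 1).foldl
        (fun acc x => if Int.gcd x M = 1 then acc ++ [x] else acc) []
      = (PySem.List.pyRange 1 (M + 1) 1).filter (fun x => !pvMarked M x.toNat) := by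
  rw [PySem.List.foldl_append_ite_eq_filter]
  rw [List.nil_append]
  apply List.filter_congr
  intro x hx
  rw [PySem.List.mem_pyRange_one] at hx
  have hm : pvMarked M x.toNat
      = ((pvFs M).any (fun f =>
          (PySem.List.pyRange 1 (PySem.Int.floordiv M f + 1) 1).any
            (fun k => x.toNat = (k * f).toNat))) := by
    unfold pvMarked
    rw [pv_outer (pvFs M) (fun f => PySem.List.pyRange 1 (PySem.Int.floordiv M f + 1) 1)
          (fun f k => (k * f).toNat) (fun _ => false) x.toNat]
    simp
  have hiff := pv_any_iff M x hM (by omega) (by omega)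
  by_cases hgcd : Int.gcd x M = 1
  · simp only [hgcd, decide_true, hm]
    rcases h : (pvFs M).any _ with _ | _
    · simp
    · exact absurd (hiff.mp h) (by simp [hgcd])
  · simp only [hgcd, decide_false, hm]
    rw [hiff.mpr hgcd]; rfl

theorem pv_gaps_aux (t : List Int) (s : Int) (hs : 1 ≤ s) (gaps : List Int) (prev : Int) :
    ((PySem.List.enumerate t s).foldl
        (fun (st : List Int × Option Int) ic =>
          if ic.1 = 0 then (st.1, some ic.2)
          else (st.1 ++ [ic.2 - st.2.getD 0], some ic.2)) (gaps, some prev)).1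
      = gaps ++ ((prev :: t).zip t).map (fun p => p.2 - p.1) := by
  induction t generalizing s gaps prev with
  | nil => simp [PySem.List.enumerate_nil]
  | cons x t ih =>
      rw [PySem.List.enumerate_cons, List.foldl_cons]
      simp only [if_neg (by omega : ¬ s = 0), Option.getD_some]
      rw [ih (s + 1) (by omega) (gaps ++ [x - prev]) x]
      simp [List.zip_cons_cons]

theorem pv_gaps (cs : List Int) :
    ((PySem.List.enumerate cs 0).foldl
        (fun (st : List Int × Option Int) ic =>
          if ic.1 = 0 then (st.1, some ic.2)
          else (st.1 ++ [ic.2 - st.2.getD 0], some ic.2)) ([], none)).1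
      = (cs.zip cs.tail).map (fun p => p.2 - p.1) := by
  cases cs with
  | nil => simp [PySem.List.enumerate_nil]
  | cons c t =>
      rw [PySem.List.enumerate_cons, List.foldl_cons]
      norm_num
      rw [pv_gaps_aux t 1 (by omega) [] c]
      simp


theorem pv_alt_eq (M : Int) : primorial_gaps_alt M =
    (let cs : List Int := (PySem.List.pyRange 1 (M + 1) 1).filter (fun x => !pvMarked M x.toNat);
     (cs.zip cs.tail).map (fun p => p.2 - p.1)
       ++ [PySem.List.pyGetD cs 0 0 + M - PySem.List.pyGetD cs (-1) 0]) := rfl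

theorem pv_final (M : Int) (hPre : 1 ≤ M) : primorial_gaps M = primorial_gaps_alt M := by
  rw [pv_alt_eq]
  simp only [primorial_gaps]
  rw [pv_coprimes_eq M hPre, pv_gaps]

-- ===== VERDICT (by name: the statement is the Claim_ definition above) =====
theorem primorial_gaps_spec : Claim_equal_primorial_gaps := by
  intro M _ hPre
  show primorial_gaps M = primorial_gaps_alt M
  exact pv_final M hPre
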